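-- pv_equiv track=rewrite | github.com/Edu92337/CodeForces | 460A.py | meias
-- ===== SOURCE A (Python) =====
-- def meias(lista):
--     lista = [int(i) for i in lista]
--     pares = lista[0]
--     frequencia_de_compra =lista[1]
--     dias = 0
--     dias_totas = 0
--     while pares > 0:
--         dias_totas += 1
--         pares -= 1
--         dias +=1
--         if dias == frequencia_de_compra:
--             pares +=1
--             dias = 0
--     return dias_totas
-- ===== SOURCE B (Python) =====
-- def meias(lista):
--     n = int(lista[0])
--     m = int(lista[1])
--     if n <= 0:
--         return 0
--     if m <= 1:
--         return n
--     return n + (n - 1) // (m - 1)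
-- ===== Notes on version B (the rewrite author's own statement) =====
-- stated objective: faster
-- what changed: Replaced the day-by-day simulation loop with the closed-form formula n + (n-1)//(m-1) for the geometric replenishment sum.
-- outside the precondition, e.g. on meias([0]): A raises IndexError, B raises IndexError; on meias([1]): A raises IndexError, B raises IndexError; on meias([2, 1]): A does not finish within the time limit, B returns 2
import Mathlib
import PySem

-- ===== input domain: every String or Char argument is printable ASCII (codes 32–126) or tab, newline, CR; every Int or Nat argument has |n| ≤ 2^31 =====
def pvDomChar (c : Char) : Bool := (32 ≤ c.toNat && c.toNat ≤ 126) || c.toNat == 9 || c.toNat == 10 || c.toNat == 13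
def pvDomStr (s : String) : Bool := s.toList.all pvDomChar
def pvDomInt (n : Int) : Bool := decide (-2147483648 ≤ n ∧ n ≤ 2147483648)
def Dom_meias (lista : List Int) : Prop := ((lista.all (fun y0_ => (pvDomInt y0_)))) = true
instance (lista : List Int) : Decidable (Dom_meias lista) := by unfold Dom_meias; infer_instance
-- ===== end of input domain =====

-- B replaces A's day-by-day simulation loop with the closed-form formula n + (n-1)//(m-1): asymptotically faster (O(1) vs O(result)).


-- ===== PORT A =====
-- A's while loop, transliterated with a fuel bound used only to make it total;
-- under Pre_meias the loop performs at most 2*pares+2 iterations (proved below), so the fuel is never exhausted.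
def simLoop : Nat → Int → Int → Int → Int → Int
  | 0, _, _, _, dias_totas => dias_totas
  | fuel + 1, pares, freq, dias, dias_totas =>
    if pares > 0 then
      let dias_totas := dias_totas + 1
      let pares := pares - 1
      let dias := dias + 1
      if dias = freq then simLoop fuel (pares + 1) freq 0 dias_totas
      else simLoop fuel pares freq dias dias_totas
    else dias_totas

def meias (lista : List Int) : Int :=
  let lista := lista.map (fun i => i)   -- [int(i) for i in lista] : identity on ints
  match PySem.List.pyGet? lista 0, PySem.List.pyGet? lista 1 with
  | some pares, some freq => simLoop (2 * pares.toNat + 2) pares freq 0 0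
  | _, _ => 0   -- IndexError: excluded by Pre_meias

-- ===== PORT B =====
def meias_alt (lista : List Int) : Int :=
  match PySem.List.pyGet? lista 0 with
  | none => 0   -- IndexError, as in A: excluded by Pre_meias
  | some n =>
    match PySem.List.pyGet? lista 1 with
    | none => 0   -- IndexError: excluded by Pre_meias
    | some m =>
      if n ≤ 0 then 0
      else if m ≤ 1 then n
      else n + PySem.Int.floordiv (n - 1) (m - 1)

-- ===== PRECONDITION & SPEC =====
-- Pre_ excludes lists with fewer than 2 elements (A raises IndexError) and lists with lista[1] = 1 and
-- lista[0] > 0 (a sock is bought every day, so A's while loop never terminates).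
def Pre_meias (lista : List Int) : Prop :=
  2 ≤ lista.length ∧ ¬ (lista.getD 1 0 = 1 ∧ 0 < lista.getD 0 0)
instance (lista : List Int) : Decidable (Pre_meias lista) := by unfold Pre_meias; infer_instance
def pvWitness_meias : List Int := [4, 2]
def Spec_meias (lista : List Int) (out : Int) : Prop := out = meias_alt lista
instance (lista : List Int) (out : Int) : Decidable (Spec_meias lista out) := by unfold Spec_meias; infer_instance

-- ===== CLAIM (what is proved, stated in full; the proofs are below) =====
def Claim_equal_meias : Prop := ∀ (lista : List Int), Dom_meias lista → Pre_meias lista → Spec_meias lista (meias lista)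

-- ===== LEMMAS AND PROOFS =====

-- freq ≤ 0: the replenishment branch never fires (dias stays positive), so the loop counts pares days.
theorem simLoop_nonpos (freq : Int) (hm : freq ≤ 0) :
    ∀ (fuel : Nat) (pares dias dt : Int), 0 ≤ dias → pares ≤ fuel →
      simLoop fuel pares freq dias dt = dt + max pares 0 := by
  intro fuel
  induction fuel with
  | zero =>
    intro pares dias dt hd hf
    simp only [simLoop]
    omega
  | succ f ih =>
    intro pares dias dt hd hf
    by_cases hp : pares > 0
    · have hne : ¬ (dias + 1 = freq) := by omega
      simp only [simLoop, if_pos hp, if_neg hne]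
      rw [ih (pares - 1) (dias + 1) (dt + 1) (by omega) (by omega)]
      omega
    · simp only [simLoop, if_neg hp]
      omega

-- freq ≥ 2: remaining days from state (pares, dias)
def remDays (freq pares dias : Int) : Int :=
  if pares ≤ 0 then 0 else pares + (pares - 1 + dias) / (freq - 1)

theorem remDays_nonneg (freq pares dias : Int) (hm : 2 ≤ freq) (hd : 0 ≤ dias) :
    0 ≤ remDays freq pares dias := by
  unfold remDays
  split_ifs with h
  · omega
  · have : (0:Int) ≤ (pares - 1 + dias) / (freq - 1) :=
      Int.ediv_nonneg (by omega) (by omega)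
    omega

theorem simLoop_pos (freq : Int) (hm : 2 ≤ freq) :
    ∀ (fuel : Nat) (pares dias dt : Int), 0 ≤ dias → dias < freq →
      remDays freq pares dias ≤ fuel →
      simLoop fuel pares freq dias dt = dt + remDays freq pares dias := by
  intro fuel
  induction fuel with
  | zero =>
    intro pares dias dt hd0 hdm hf
    have h0 := remDays_nonneg freq pares dias hm hd0
    have hr : remDays freq pares dias = 0 := by omega
    have hp : pares ≤ 0 := by
      by_contra hp
      have : 1 ≤ remDays freq pares dias := by
        unfold remDays
        rw [if_neg (by omega)]
        have : (0:Int) ≤ (pares - 1 + dias) / (freq - 1) :=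
          Int.ediv_nonneg (by omega) (by omega)
        omega
      omega
    simp only [simLoop]
    rw [hr]; omega
  | succ f ih =>
    intro pares dias dt hd0 hdm hf
    by_cases hp : pares > 0
    · have hrem : remDays freq pares dias = pares + (pares - 1 + dias) / (freq - 1) := by
        unfold remDays; rw [if_neg (by omega)]
      by_cases hb : dias + 1 = freq
      · -- replenishment step: state becomes (pares, 0)
        simp only [simLoop, if_pos hp, if_pos hb]
        have key : (pares - 1 + dias) / (freq - 1) = (pares - 1) / (freq - 1) + 1 := by
          have : pares - 1 + dias = pares - 1 + 1 * (freq - 1) := by omega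
          rw [this, Int.add_mul_ediv_right _ _ (by omega : freq - 1 ≠ 0)]
        have hrem0 : remDays freq pares 0 = pares + (pares - 1) / (freq - 1) := by
          unfold remDays; rw [if_neg (by omega)]; ring_nf
        have e : pares - 1 + 1 = pares := by omega
        rw [e, ih pares 0 (dt + 1) (by omega) (by omega) (by rw [hrem0]; rw [hrem, key] at hf; omega)]
        rw [hrem0, hrem, key]; omega
      · simp only [simLoop, if_pos hp, if_neg hb]
        have step : remDays freq (pares - 1) (dias + 1) = remDays freq pares dias - 1 := by
          by_cases h1 : pares - 1 ≤ 0
          · have hpe : pares = 1 := by omega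
            have : (pares - 1 + dias) / (freq - 1) = 0 :=
              Int.ediv_eq_zero_of_lt (by omega) (by omega)
            unfold remDays
            rw [if_pos h1, if_neg (by omega)]
            omega
          · unfold remDays
            rw [if_neg h1, if_neg (by omega)]
            have : pares - 1 - 1 + (dias + 1) = pares - 1 + dias := by ring
            rw [this]; omega
        rw [ih (pares - 1) (dias + 1) (dt + 1) (by omega) (by omega) (by omega : remDays freq (pares - 1) (dias + 1) ≤ f)]
        omega
    · have : remDays freq pares dias = 0 := by unfold remDays; rw [if_pos (by omega)]
      simp only [simLoop, if_neg hp]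
      omega

theorem pyGet_of_len2 (lista : List Int) (h : 2 ≤ lista.length) :
    PySem.List.pyGet? lista 0 = some (lista.getD 0 0) ∧
    PySem.List.pyGet? lista 1 = some (lista.getD 1 0) := by
  match lista, h with
  | a :: b :: t, _ =>
    have h1 : (0:Int) ≤ (t.length:Int) + 1 := by positivity
    constructor <;> simp [PySem.List.pyGet?, PySem.List.pyIdx?, h1]

-- ===== VERDICT (by name: the statement is the Claim_ definition above) =====
theorem meias_spec : Claim_equal_meias := by
  intro lista _ hpre
  obtain ⟨hlen, hne⟩ := hpre
  obtain ⟨h0, h1⟩ := pyGet_of_len2 lista hlen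
  set n := lista.getD 0 0 with hn
  set m := lista.getD 1 0 with hmd
  show meias lista = meias_alt lista
  unfold meias meias_alt
  simp only [List.map_id_fun', id_eq, h0, h1]
  by_cases hnp : n ≤ 0
  · -- loop exits immediately
    rw [if_pos hnp]
    simp only [simLoop]
    rw [if_neg (by omega)]
  · rw [if_neg hnp]
    by_cases hm1 : m ≤ 1
    · -- here m ≤ 0 (m = 1 with 0 < n is excluded by Pre_)
      have hm0 : m ≤ 0 := by omega
      rw [if_pos hm1]
      rw [simLoop_nonpos m hm0 _ n 0 0 (by omega) (by push_cast; omega)]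
      omega
    · rw [if_neg hm1]
      have hm2 : 2 ≤ m := by omega
      have hdivle : (n - 1) / (m - 1) ≤ n - 1 := Int.ediv_le_self _ (by omega)
      have hdiv0 : 0 ≤ (n - 1) / (m - 1) := Int.ediv_nonneg (by omega) (by omega)
      have hrem : remDays m n 0 = n + (n - 1) / (m - 1) := by
        unfold remDays; rw [if_neg (by omega)]; ring_nf
      rw [simLoop_pos m hm2 _ n 0 0 (by omega) (by omega)
        (by rw [hrem]; push_cast; omega)]
      rw [hrem, PySem.Int.floordiv_eq_ediv_of_pos (by omega)]
      omega
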